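-- pv_equiv track=rewrite | github.com/linhdvu14/cp-sols | sols/CodeForces/1642_d2/D_Repetitions_Decoding.py | solve
-- ===== SOURCE A (Python) =====
-- def solve(N, A):
--     # iteratively remove (A[0], A[i]) pair where i > 0 is idx of first occurrence of A[0]
--     # abcda|... -> abcda|bcddcb|... -> abcdabcd|dcb|... -> ...|dcb|...
--     ops, lens = [], []
--     offset = 0
--     while A:
--         # abcd|a...
--         j = 1
--         while j < len(A) and A[j] != A[0]: j += 1
--         if j == len(A): return -1, [], []
--
--         # abcd|a|bcddcb...
--         for k in range(1, j):
--             ops.append((offset + j + k, A[k]))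
--         lens.append(2 * j)
--
--         # abcdabcd|dcb... <-> aa|dcb...
--         A = A[1:j][::-1] + A[j+1:]
--         offset += lens[-1]
--
--     return len(ops), ops, lens
-- ===== SOURCE B (Python) =====
-- def solve(N, A):
--     # Stack-based reformulation: the front of the current sequence is kept as a
--     # stack F (top = first element) and the untouched tail as a stack T; each
--     # step pops/pushes only the elements it touches, no full-list copying.
--     F = []
--     T = A[::-1]
--     ops, lens = [], []
--     offset = 0
--     while F or T:
--         x = F.pop() if F else T.pop()
--         mid = []
--         while F and F[-1] != x:
--             mid.append(F.pop())
--         if F: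
--             F.pop()
--         else:
--             while T and T[-1] != x:
--                 mid.append(T.pop())
--             if not T:
--                 return -1, [], []
--             T.pop()
--         j = len(mid) + 1
--         for k, v in enumerate(mid, 1):
--             ops.append((offset + j + k, v))
--         lens.append(2 * j)
--         offset += 2 * j
--         F.extend(mid)
--     return len(ops), ops, lens
-- ===== Notes on version B (the rewrite author's own statement) =====
-- stated objective: faster
-- what changed: Replaces A's per-step full-list rebuild (A = A[1:j][::-1] + A[j+1:]) by two stacks (front of the current sequence and untouched tail) that are popped/pushed in place, so each step costs O(j) instead of O(len(A)).
import Mathlib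
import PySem

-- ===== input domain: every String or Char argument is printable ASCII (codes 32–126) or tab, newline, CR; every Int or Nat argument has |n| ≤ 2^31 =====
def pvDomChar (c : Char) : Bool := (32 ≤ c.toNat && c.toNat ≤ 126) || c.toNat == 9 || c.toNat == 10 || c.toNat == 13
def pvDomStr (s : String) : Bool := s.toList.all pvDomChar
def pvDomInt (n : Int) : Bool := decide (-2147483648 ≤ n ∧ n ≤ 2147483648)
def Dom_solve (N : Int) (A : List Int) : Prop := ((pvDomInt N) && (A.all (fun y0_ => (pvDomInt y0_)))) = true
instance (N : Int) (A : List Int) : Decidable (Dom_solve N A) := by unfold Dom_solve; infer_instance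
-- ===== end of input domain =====

-- B replaces A's per-step full-list rebuild (A = A[1:j][::-1] + A[j+1:]) by two in-place stacks
-- (front of the current sequence / untouched tail), touching only the elements of each step.

-- ===== PORT A =====
-- inner `j = 1; while j < len(A) and A[j] != A[0]: j += 1`
def whileJ (A : List Int) (j : Nat) : Nat :=
  if h : j < A.length then
    if A.getD j 0 != A.getD 0 0 then whileJ A (j + 1) else j
  else j
termination_by A.length - j

-- cited by solveLoop's and altLoop's termination proofs
theorem tw_dw_len (p : Int → Bool) (s : List Int) :
    (s.takeWhile p).length + (s.dropWhile p).length = s.length := by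
  conv_rhs => rw [← List.takeWhile_append_dropWhile (p := p) (l := s)]
  rw [List.length_append]

-- characterization of the inner while; cited by solveLoop's decreasing_by
theorem whileJ_eq (A : List Int) (j : Nat) :
    whileJ A j = j + ((A.drop j).takeWhile (· != A.getD 0 0)).length := by
  fun_induction whileJ A j with
  | case1 j h hne ih =>
    have hd : A.drop j = A.getD j 0 :: A.drop (j + 1) := by
      rw [List.getD_eq_getElem _ _ h]
      exact List.drop_eq_getElem_cons h
    rw [ih, hd]
    simp only [List.takeWhile_cons, hne, if_true, List.length_cons]
    omega
  | case2 j h hne =>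
    have hd : A.drop j = A.getD j 0 :: A.drop (j + 1) := by
      rw [List.getD_eq_getElem _ _ h]
      exact List.drop_eq_getElem_cons h
    have hf : (A.getD j 0 != A.getD 0 0) = false := by simpa using hne
    rw [hd]
    simp only [List.takeWhile_cons, hf, Bool.false_eq_true, if_false, List.length_nil]
    omega
  | case3 j h =>
    rw [List.drop_of_length_le (by omega)]
    simp

-- outer `while A:`; `A[1:j][::-1]` is slice + reverse (PySem.List.slice?_none_none_neg_one), `lens[-1]` is pyGetD _ (-1)
def solveLoop (A : List Int) (ops : List (Int × Int)) (lens : List Int) (offset : Int) :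
    Int × List (Int × Int) × List Int :=
  if hA : A = [] then ((ops.length : Int), ops, lens)
  else
    let j := whileJ A 1
    if hj : j = A.length then (-1, [], [])
    else
      let ops' := (PySem.List.pyRange 1 (j : Int) 1).foldl
        (fun acc k => acc ++ [(offset + (j : Int) + k, PySem.List.pyGetD A k 0)]) ops
      let lens' := lens ++ [2 * (j : Int)]
      solveLoop ((PySem.List.slice A (some 1) (some (j : Int))).reverse ++
                 PySem.List.slice A (some ((j : Int) + 1)) none)
        ops' lens' (offset + PySem.List.pyGetD lens' (-1) 0)
termination_by A.length
decreasing_by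
  have h1 : 1 ≤ whileJ A 1 := by rw [whileJ_eq]; omega
  have h2 : whileJ A 1 ≤ A.length := by
    rw [whileJ_eq]
    have := tw_dw_len (· != A.getD 0 0) (A.drop 1)
    have hlen : (A.drop 1).length = A.length - 1 := by simp
    have : 1 ≤ A.length := by
      cases A with
      | nil => exact absurd rfl hA
      | cons a as => simp
    omega
  rw [show (some (1 : Int)) = some ((1 : Nat) : Int) from rfl]
  rw [PySem.List.slice_natCast A 1 (whileJ A 1)]
  have hc2 : ((whileJ A 1 : Nat) : Int) + 1 = (((whileJ A 1 + 1 : Nat)) : Int) := by push_cast; ring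
  rw [hc2, PySem.List.slice_from_natCast]
  simp
  omega

def solve (N : Int) (A : List Int) : Int × (List (Int × Int)) × List Int :=
  solveLoop A [] [] 0

-- ===== PORT B =====
-- Source B keeps two Python stacks whose tops are at the END; here each stack is a List with its top
-- at the HEAD, so s.pop() = head/tail, `mid.append(s.pop())` = `mid ++ [y]`, `F.extend(mid)` = `mid.reverse ++ F`.
-- inner `while s and s[-1] != x: mid.append(s.pop())`; returns (mid, remaining stack)
def altScan (x : Int) (s : List Int) (mid : List Int) : List Int × List Int :=
  match s with
  | [] => (mid, [])
  | y :: ys => if y != x then altScan x ys (mid ++ [y]) else (mid, y :: ys)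

-- characterization of the inner while; cited by altLoop's decreasing_by
theorem altScan_spec (x : Int) (s : List Int) : ∀ (mid : List Int),
    altScan x s mid = (mid ++ s.takeWhile (· != x), s.dropWhile (· != x)) := by
  induction s with
  | nil => intro mid; simp [altScan]
  | cons y ys ih =>
    intro mid
    by_cases h : (y != x) = true
    · simp [altScan, h, ih]
    · simp [altScan, h]

theorem altScan_len (x : Int) (s mid : List Int) :
    (altScan x s mid).1.length + (altScan x s mid).2.length = mid.length + s.length := by
  rw [altScan_spec]
  have := tw_dw_len (· != x) s
  simp only [List.length_append]
  omega

-- `j = len(mid) + 1; for k, v in enumerate(mid, 1): ops.append((offset + j + k, v))`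
def altOps (offset j : Int) (mid : List Int) : List (Int × Int) :=
  (PySem.List.enumerate mid 1).map (fun kv => (offset + j + kv.1, kv.2))

-- outer `while F or T:` of Source B
def altLoop (F T : List Int) (ops : List (Int × Int)) (lens : List Int) (offset : Int) :
    Int × List (Int × Int) × List Int :=
  match F, T with
  | [], [] => ((ops.length : Int), ops, lens)
  | x :: F', T =>
    let s := altScan x F' []
    if hF : s.2 = [] then
      let s2 := altScan x T s.1
      if hT : s2.2 = [] then (-1, [], [])
      else
        let j : Int := (s2.1.length : Int) + 1
        altLoop s2.1.reverse s2.2.tail (ops ++ altOps offset j s2.1) (lens ++ [2 * j]) (offset + 2 * j)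
    else
      let j : Int := (s.1.length : Int) + 1
      altLoop (s.1.reverse ++ s.2.tail) T (ops ++ altOps offset j s.1) (lens ++ [2 * j]) (offset + 2 * j)
  | [], x :: T' =>
    let s2 := altScan x T' []
    if hT : s2.2 = [] then (-1, [], [])
    else
      let j : Int := (s2.1.length : Int) + 1
      altLoop s2.1.reverse s2.2.tail (ops ++ altOps offset j s2.1) (lens ++ [2 * j]) (offset + 2 * j)
termination_by F.length + T.length
decreasing_by
  · have h1 := altScan_len x F' []
    have h2 := altScan_len x T (altScan x F' []).1
    have h5 : 1 ≤ (altScan x T (altScan x F' []).1).2.length := by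
      cases h : (altScan x T (altScan x F' []).1).2 with
      | nil => exact absurd h hT
      | cons a as => simp
    simp at h1 h2 ⊢
    omega
  · have h1 := altScan_len x F' []
    have h5 : 1 ≤ (altScan x F' []).2.length := by
      cases h : (altScan x F' []).2 with
      | nil => exact absurd h hF
      | cons a as => simp
    simp at h1 ⊢
    omega
  · have h1 := altScan_len x T' []
    have h5 : 1 ≤ (altScan x T' []).2.length := by
      cases h : (altScan x T' []).2 with
      | nil => exact absurd h hT
      | cons a as => simp
    simp at h1 ⊢
    omega

def solve_alt (N : Int) (A : List Int) : Int × (List (Int × Int)) × List Int :=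
  altLoop [] A [] [] 0

-- ===== PRECONDITION & SPEC =====
def Spec_solve (N : Int) (A : List Int) (out : Int × (List (Int × Int)) × List Int) : Prop := out = solve_alt N A
instance (N : Int) (A : List Int) (out : Int × (List (Int × Int)) × List Int) : Decidable (Spec_solve N A out) := by unfold Spec_solve; infer_instance

-- ===== CLAIM (what is proved, stated in full; the proofs are below) =====
def Claim_equal_solve : Prop := ∀ (N : Int) (A : List Int), Dom_solve N A → Spec_solve N A (solve N A)

-- ===== LEMMAS AND PROOFS =====

-- A's `for k in range(1, j)` over indices of A equals B's `enumerate(mid, 1)` over the scanned prefix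
theorem enum_map (mid : List Int) : ∀ (A : List Int) (s : Nat) (rest' : List Int) (c : Int),
    A.drop s = mid ++ rest' →
    (PySem.List.pyRange (s : Int) (((s + mid.length : Nat)) : Int) 1).map
        (fun k => (c + k, PySem.List.pyGetD A k 0))
      = (PySem.List.enumerate mid (s : Int)).map (fun kv => (c + kv.1, kv.2)) := by
  induction mid with
  | nil =>
    intro A s rest' c _
    rw [PySem.List.pyRange_one_eq_nil (by simp)]
    simp [PySem.List.enumerate]
  | cons m ms ih =>
    intro A s rest' c hdrop
    have hm : A[s]? = some m := by
      have h0 : (A.drop s)[0]? = some m := by rw [hdrop]; rfl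
      rw [List.getElem?_drop] at h0
      simpa using h0
    have hdrop' : A.drop (s + 1) = ms ++ rest' := by
      have : A.drop (s + 1) = (A.drop s).drop 1 := by rw [List.drop_drop]
      rw [this, hdrop]
      simp
    rw [PySem.List.pyRange_one_cons (by simp only [List.length_cons]; push_cast; omega), PySem.List.enumerate_cons,
      List.map_cons, List.map_cons]
    congr 1
    · simp only [PySem.List.pyGetD_natCast]
      rw [List.getD_eq_getElem?_getD, hm]
      rfl
    · have e := ih A (s + 1) rest' c hdrop'
      rw [show s + (m :: ms).length = (s + 1) + ms.length from by
      simp only [List.length_cons]; omega]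
      rw [show (s : Int) + 1 = ((s + 1 : Nat) : Int) from by push_cast; ring]
      exact e

-- one step of A's outer loop, phrased through takeWhile/dropWhile of the tail
theorem stepA (x : Int) (rest : List Int) (ops : List (Int × Int)) (lens : List Int) (offset : Int) :
    solveLoop (x :: rest) ops lens offset =
      match rest.dropWhile (· != x) with
      | [] => (-1, [], [])
      | _ :: s' =>
        let mid := rest.takeWhile (· != x)
        let j : Int := (mid.length : Int) + 1
        solveLoop (mid.reverse ++ s') (ops ++ altOps offset j mid) (lens ++ [2 * j]) (offset + 2 * j) := by
  have hA : (x :: rest) ≠ [] := by simp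
  have hwj : whileJ (x :: rest) 1 = 1 + (rest.takeWhile (· != x)).length := by
    rw [whileJ_eq]; simp
  have hsplit : rest.takeWhile (· != x) ++ rest.dropWhile (· != x) = rest :=
    List.takeWhile_append_dropWhile
  have hlens := tw_dw_len (· != x) rest
  rw [solveLoop]
  rw [dif_neg hA]
  cases hdw : rest.dropWhile (· != x) with
  | nil =>
    rw [hdw] at hlens hsplit
    rw [dif_pos (by rw [hwj]; simp at hlens ⊢; omega)]
  | cons d0 s' =>
    rw [hdw] at hlens hsplit
    have hne : ¬ whileJ (x :: rest) 1 = (x :: rest).length := by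
      rw [hwj]; simp at hlens ⊢; omega
    rw [dif_neg hne]
    simp only []
    set mid := rest.takeWhile (· != x) with hmid
    -- the appended ops
    have hops : (PySem.List.pyRange 1 ((whileJ (x :: rest) 1 : Nat) : Int) 1).foldl
        (fun acc k => acc ++ [(offset + ((whileJ (x :: rest) 1 : Nat) : Int) + k, PySem.List.pyGetD (x :: rest) k 0)]) ops
        = ops ++ altOps offset ((mid.length : Int) + 1) mid := by
      rw [PySem.List.foldl_append_singleton_eq_map]
      congr 1
      have e := enum_map mid (x :: rest) 1 (d0 :: s') (offset + ((mid.length : Int) + 1))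
        (by simpa using hsplit.symm)
      rw [hwj, show 1 + mid.length = 1 + mid.length from rfl]
      rw [show ((1 + mid.length : Nat) : Int) = ((mid.length : Int) + 1) from by push_cast; ring] at e ⊢
      rw [show ((1 : Nat) : Int) = (1 : Int) from rfl] at e
      rw [altOps]
      exact e
    -- the new list
    have hsplit2 : (x :: rest) = ((x :: mid) ++ [d0]) ++ s' := by
      conv_lhs => rw [← hsplit]
      simp
    have htake : List.take (whileJ (x :: rest) 1 - 1) (List.drop 1 (x :: rest)) = mid := by
      rw [hwj]
      simp only [List.drop_one, List.tail_cons, Nat.add_sub_cancel_left]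
      conv_lhs => rw [← hsplit]
      exact List.take_left' rfl
    have hdrop : (x :: rest).drop (whileJ (x :: rest) 1 + 1) = s' := by
      rw [hwj, hsplit2]
      refine List.drop_left' ?_
      simp
      omega
    rw [PySem.List.pyGetD_neg_one_append_singleton]
    rw [hops]
    rw [show (some (1 : Int)) = some (((1 : Nat)) : Int) from rfl,
      PySem.List.slice_natCast]
    rw [show (((whileJ (x :: rest) 1 : Nat)) : Int) + 1 = ((whileJ (x :: rest) 1 + 1 : Nat) : Int) from by push_cast; ring,
      PySem.List.slice_from_natCast]
    rw [hdrop]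
    rw [htake]
    rw [hwj]
    rw [show ((1 + mid.length : Nat) : Int) = ((mid.length : Int) + 1) from by push_cast; ring]

theorem loop_eq : ∀ (n : Nat) (F T : List Int) (ops : List (Int × Int)) (lens : List Int) (offset : Int),
    F.length + T.length ≤ n → solveLoop (F ++ T) ops lens offset = altLoop F T ops lens offset := by
  intro n
  induction n with
  | zero =>
    intro F T ops lens offset h
    have hF : F = [] := by cases F <;> simp_all
    have hT : T = [] := by cases T <;> simp_all
    subst hF; subst hT
    rw [solveLoop, altLoop]
    simp
  | succ n ih =>
    intro F T ops lens offset h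
    cases F with
    | nil =>
      cases T with
      | nil =>
        rw [solveLoop, altLoop]
        simp
      | cons x T' =>
        rw [List.nil_append, stepA, altLoop]
        simp only [altScan_spec]
        have hlens := tw_dw_len (· != x) T'
        cases hdw : T'.dropWhile (· != x) with
        | nil => rw [dif_pos rfl]
        | cons d0 T3 =>
          rw [dif_neg (by simp)]
          simp only [List.tail_cons, List.nil_append]
          have hle : ((T'.takeWhile (· != x)).reverse).length + T3.length ≤ n := by
            rw [hdw] at hlens
            simp at hlens h ⊢
            omega
          exact ih _ _ _ _ _ hle
    | cons y F' =>
      rw [List.cons_append, stepA, altLoop]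
      simp only [altScan_spec, List.nil_append]
      have hlF := tw_dw_len (· != y) F'
      have hlT := tw_dw_len (· != y) T
      cases hdwF : F'.dropWhile (· != y) with
      | nil =>
        have htwF : F'.takeWhile (· != y) = F' := by
          rw [hdwF] at hlF
          have hp := List.takeWhile_prefix (l := F') (p := (· != y))
          rw [List.prefix_iff_eq_take] at hp
          rw [hp, List.take_of_length_le]
          simp at hlF
          omega
        have htwA : (F' ++ T).takeWhile (· != y) = F' ++ T.takeWhile (· != y) := by
          rw [List.takeWhile_append, if_pos (by rw [htwF])]
        have hdwA : (F' ++ T).dropWhile (· != y) = T.dropWhile (· != y) := by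
          rw [List.dropWhile_append, if_pos (by rw [hdwF]; rfl)]
        rw [dif_pos rfl]
        simp only [htwF]
        rw [htwA, hdwA]
        cases hdwT : T.dropWhile (· != y) with
        | nil => rfl
        | cons d0 T3 =>
          simp only [List.tail_cons]
          have hle : ((F' ++ T.takeWhile (· != y)).reverse).length + T3.length ≤ n := by
            rw [hdwT] at hlT
            rw [hdwF] at hlF
            simp at hlF hlT h ⊢
            omega
          exact ih _ _ _ _ _ hle
      | cons d0 F3 =>
        have htwA : (F' ++ T).takeWhile (· != y) = F'.takeWhile (· != y) := by
          rw [List.takeWhile_append, if_neg ?_]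
          rw [hdwF] at hlF
          simp at hlF ⊢
          omega
        have hdwA : (F' ++ T).dropWhile (· != y) = d0 :: (F3 ++ T) := by
          rw [List.dropWhile_append, if_neg (by rw [hdwF]; simp), hdwF]
          rfl
        rw [dif_neg (by simp)]
        rw [htwA, hdwA]
        simp only [List.tail_cons]
        have hle : ((F'.takeWhile (· != y)).reverse ++ F3).length + T.length ≤ n := by
          rw [hdwF] at hlF
          simp at hlF h ⊢
          omega
        rw [← List.append_assoc]
        exact ih _ _ _ _ _ hle

-- ===== VERDICT (by name: the statement is the Claim_ definition above) =====
theorem solve_spec : Claim_equal_solve := by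
  intro N A _
  unfold Spec_solve solve solve_alt
  have := loop_eq (A.length) [] A [] [] 0 (by simp)
  simpa using this
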